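-- pv_equiv track=rewrite | github.com/FireLord/dsa | python/dsa/array/hard/lc-152-Maximum-Product-Subarray.py | maxProdSubArrayBetter
-- ===== SOURCE A (Python) =====
-- def maxProdSubArrayBetter(nums):
--     n = len(nums)
--     result = -1
--     for i in range(n):
--         prod = nums[i]
--         for j in range(i+1, n):
--             prod *= nums[j]
--             result = max(result, prod)
--
--     return result
-- ===== SOURCE B (Python) =====
-- def maxProdSubArrayBetter(nums):
--     # O(n) DP: track max/min products of subarrays ending at the current index,
--     # update the result only with extended (length >= 2) products.
--     result = -1
--     if not nums:
--         return result
--     hi = lo = nums[0]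
--     for x in nums[1:]:
--         a = hi * x
--         b = lo * x
--         result = max(result, a, b)
--         hi = max(x, a, b)
--         lo = min(x, a, b)
--     return result
-- ===== Notes on version B (the rewrite author's own statement) =====
-- stated objective: faster
-- what changed: Replaced the O(n^2) nested loop over all start/end pairs by a single-pass DP that tracks the max and min product of a subarray ending at the current index and folds only the extended (length>=2) products into the result.
import Mathlib
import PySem

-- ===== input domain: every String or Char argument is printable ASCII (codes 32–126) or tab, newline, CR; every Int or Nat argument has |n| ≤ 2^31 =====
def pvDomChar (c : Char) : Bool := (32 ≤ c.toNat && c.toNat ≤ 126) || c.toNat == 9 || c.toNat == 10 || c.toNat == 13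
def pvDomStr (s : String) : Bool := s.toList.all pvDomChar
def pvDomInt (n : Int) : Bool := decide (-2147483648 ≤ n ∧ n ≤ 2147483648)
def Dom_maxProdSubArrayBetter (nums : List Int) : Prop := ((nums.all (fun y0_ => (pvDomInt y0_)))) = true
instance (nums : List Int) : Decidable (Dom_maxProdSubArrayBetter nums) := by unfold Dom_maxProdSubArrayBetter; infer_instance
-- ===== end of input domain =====

-- B replaces A's O(n^2) scan of all start/end pairs by a single O(n) pass tracking the
-- max/min products of subarrays ending at the current index (result only takes length>=2 products).

-- ===== PORT A =====
-- one inner-loop step: prod = prod * y; result = max(result, prod); state st = (result, prod)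
def stepA (st : Int × Int) (y : Int) : Int × Int := (max st.1 (st.2 * y), st.2 * y)

-- inner loop 'for j in range(i+1, n): prod *= nums[j]; result = max(result, prod)'
def bodyA (nums : List Int) (result : Int) (i : Int) : Int :=
  ((PySem.List.pyRange (i + 1) (nums.length : Int) 1).foldl
      (fun st j => stepA st (PySem.List.pyGetD nums j 0))
      (result, PySem.List.pyGetD nums i 0)).1

def maxProdSubArrayBetter (nums : List Int) : Int :=
  (PySem.List.pyRange 0 (nums.length : Int) 1).foldl (bodyA nums) (-1)

-- ===== PORT B =====
-- one loop iteration of Source B: a = hi*x; b = lo*x; result = max(result,a,b); hi = max(x,a,b); lo = min(x,a,b)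
def stepB (st : Int × Int × Int) (x : Int) : Int × Int × Int :=
  let a := st.1 * x
  let b := st.2.1 * x
  (max (max x a) b, min (min x a) b, max (max st.2.2 a) b)

def maxProdSubArrayBetter_alt (nums : List Int) : Int :=
  match nums with
  | [] => -1
  | x0 :: _ =>
    ((PySem.List.slice nums (some 1) none).foldl stepB (x0, x0, -1)).2.2

-- ===== PRECONDITION & SPEC =====
def Spec_maxProdSubArrayBetter (nums : List Int) (out : Int) : Prop := out = maxProdSubArrayBetter_alt nums
instance (nums : List Int) (out : Int) : Decidable (Spec_maxProdSubArrayBetter nums out) := by unfold Spec_maxProdSubArrayBetter; infer_instance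

-- ===== CLAIM (what is proved, stated in full; the proofs are below) =====
def Claim_equal_maxProdSubArrayBetter : Prop := ∀ (nums : List Int), Dom_maxProdSubArrayBetter nums → Spec_maxProdSubArrayBetter nums (maxProdSubArrayBetter nums)

-- ===== LEMMAS AND PROOFS =====

-- products of the nonempty prefixes of xs, each multiplied by c (A's inner loop values)
def prodScan : Int → List Int → List Int
  | _, [] => []
  | c, y :: ys => (c * y) :: prodScan (c * y) ys

-- A's enumeration: products of all length>=2 segments, grouped by start index
def LA : List Int → List Int
  | [] => []
  | x :: xs => prodScan x xs ++ LA xs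

-- B's enumeration: given ps = products of nonempty suffixes of the processed prefix,
-- the length>=2 products contributed while consuming the rest
def LB (ps : List Int) : List Int → List Int
  | [] => []
  | x :: xs => ps.map (· * x) ++ LB (x :: ps.map (· * x)) xs

-- p is the product of some contiguous segment of l of length >= 2
def SegProd (l : List Int) (p : Int) : Prop :=
  ∃ u m v, l = u ++ m ++ v ∧ 2 ≤ m.length ∧ p = m.prod

def IsMaxOf (hi : Int) (ps : List Int) : Prop := hi ∈ ps ∧ ∀ p ∈ ps, p ≤ hi
def IsMinOf (lo : Int) (ps : List Int) : Prop := lo ∈ ps ∧ ∀ p ∈ ps, lo ≤ p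

-- ps are exactly the products of the nonempty suffixes of pre
def EndProds (pre ps : List Int) : Prop :=
  ∀ p, p ∈ ps ↔ ∃ s t, pre = t ++ s ∧ s ≠ [] ∧ p = s.prod

lemma foldl_max_le_iff (u : List Int) (a c : Int) :
    u.foldl max a ≤ c ↔ a ≤ c ∧ ∀ x ∈ u, x ≤ c := by
  induction u generalizing a with
  | nil => simp
  | cons y ys ih => simp [List.foldl_cons, ih, and_assoc]

lemma le_foldl_max (u : List Int) (a : Int) :
    a ≤ u.foldl max a ∧ ∀ x ∈ u, x ≤ u.foldl max a :=
  (foldl_max_le_iff u a _).mp le_rfl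

lemma foldl_max_ext (u v : List Int) (a : Int) (h : ∀ x, x ∈ u ↔ x ∈ v) :
    u.foldl max a = v.foldl max a := by
  apply le_antisymm
  · exact (foldl_max_le_iff u a _).mpr
      ⟨(le_foldl_max v a).1, fun x hx => (le_foldl_max v a).2 x ((h x).mp hx)⟩
  · exact (foldl_max_le_iff v a _).mpr
      ⟨(le_foldl_max u a).1, fun x hx => (le_foldl_max u a).2 x ((h x).mpr hx)⟩

lemma mem_prodScan (xs : List Int) : ∀ (c p : Int),
    (p ∈ prodScan c xs ↔ ∃ t v, xs = t ++ v ∧ t ≠ [] ∧ p = c * t.prod) := by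
  induction xs with
  | nil =>
    intro c p
    simp only [prodScan, List.not_mem_nil, false_iff]
    rintro ⟨t, v, h, ht, -⟩
    exact ht (List.append_eq_nil_iff.mp h.symm).1
  | cons y ys ih =>
    intro c p
    simp only [prodScan, List.mem_cons, ih]
    constructor
    · rintro (rfl | ⟨t, v, rfl, ht, rfl⟩)
      · exact ⟨[y], ys, rfl, by simp, by simp⟩
      · exact ⟨y :: t, v, rfl, by simp, by simp [mul_assoc]⟩
    · rintro ⟨t, v, h, ht, rfl⟩
      match t, ht with
      | y' :: t', _ =>
        obtain ⟨rfl, h2⟩ : y = y' ∧ ys = t' ++ v := by simpa using h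
        rcases t' with _ | ⟨z, t''⟩
        · left; simp
        · right
          exact ⟨z :: t'', v, h2, by simp, by simp [mul_assoc]⟩

lemma segProd_nil (p : Int) : ¬ SegProd [] p := by
  rintro ⟨u, m, v, h, hm, -⟩
  have := congrArg List.length h
  simp at this
  omega

lemma segProd_cons (x : Int) (xs : List Int) (p : Int) :
    SegProd (x :: xs) p ↔ (∃ t v, xs = t ++ v ∧ t ≠ [] ∧ p = x * t.prod) ∨ SegProd xs p := by
  constructor
  · rintro ⟨u, m, v, h, hm, rfl⟩
    rcases u with _ | ⟨u0, u'⟩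
    · match m, hm with
      | m0 :: m1 :: m', _ =>
        obtain ⟨rfl, h2⟩ : x = m0 ∧ xs = (m1 :: m') ++ v := by simpa using h
        exact Or.inl ⟨m1 :: m', v, h2, by simp, by simp⟩
    · obtain ⟨-, h2⟩ : x = u0 ∧ xs = u' ++ m ++ v := by simpa [List.append_assoc] using h
      exact Or.inr ⟨u', m, v, h2, hm, rfl⟩
  · rintro (⟨t, v, rfl, ht, rfl⟩ | ⟨u, m, v, rfl, hm, rfl⟩)
    · refine ⟨[], x :: t, v, by simp, ?_, by simp⟩
      cases t with
      | nil => exact absurd rfl ht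
      | cons a b => simp
    · exact ⟨x :: u, m, v, by simp, hm, rfl⟩

lemma mem_LA (l : List Int) (p : Int) : p ∈ LA l ↔ SegProd l p := by
  induction l with
  | nil => simpa [LA] using segProd_nil p
  | cons x xs ih =>
    simp only [LA, List.mem_append, ih, mem_prodScan, segProd_cons]

-- nonempty suffixes of pre ++ [x] are exactly s ++ [x] with s a (possibly empty) suffix of pre
lemma suffix_snoc (pre : List Int) (x : Int) (s' : List Int) :
    ((∃ t, pre ++ [x] = t ++ s') ∧ s' ≠ []) ↔ ∃ s t, s' = s ++ [x] ∧ pre = t ++ s := by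
  constructor
  · rintro ⟨⟨t, h⟩, hne⟩
    rcases s'.eq_nil_or_concat with rfl | ⟨s, y, rfl⟩
    · exact absurd rfl hne
    · rw [List.concat_eq_append] at h ⊢
      have h' : pre ++ [x] = (t ++ s) ++ [y] := by rw [h, List.append_assoc]
      have hxy : x = y := by
        have := congrArg (fun l => l.getLast?) h'
        simpa using this
      have hpre : pre = t ++ s := by
        have := congrArg List.dropLast h'
        simpa using this
      exact ⟨s, t, by rw [hxy], hpre⟩
  · rintro ⟨s, t, rfl, rfl⟩
    exact ⟨⟨t, by simp⟩, by simp⟩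

lemma endProds_step (pre ps : List Int) (x : Int) (h : EndProds pre ps) :
    EndProds (pre ++ [x]) (x :: ps.map (· * x)) := by
  intro p
  constructor
  · intro hp
    rcases List.mem_cons.mp hp with hpx | hp'
    · exact ⟨[x], pre, rfl, by simp, by simp [hpx]⟩
    · obtain ⟨q, hq, rfl⟩ := List.mem_map.mp hp'
      obtain ⟨s, t, rfl, hs, rfl⟩ := (h q).mp hq
      exact ⟨s ++ [x], t, by simp, by simp, by simp⟩
  · rintro ⟨s', t, hsplit, hne, rfl⟩
    obtain ⟨s, t', rfl, hpre⟩ := (suffix_snoc pre x s').mp ⟨⟨t, hsplit⟩, hne⟩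
    rcases s with _ | ⟨a, s0⟩
    · exact List.mem_cons.mpr (Or.inl (by simp))
    · refine List.mem_cons.mpr (Or.inr (List.mem_map.mpr
        ⟨(a :: s0).prod, (h (a :: s0).prod).mpr ⟨a :: s0, t', hpre, by simp, rfl⟩, by simp [mul_assoc]⟩))

lemma mem_LB (xs : List Int) : ∀ (pre ps : List Int) (p : Int), EndProds pre ps →
    (p ∈ LB ps xs ↔
      (∃ s t w u, pre = u ++ s ∧ s ≠ [] ∧ xs = t ++ w ∧ t ≠ [] ∧ p = (s ++ t).prod) ∨ SegProd xs p) := by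
  induction xs with
  | nil =>
    intro pre ps p _
    simp only [LB, List.not_mem_nil, false_iff]
    rintro (⟨s, t, w, u, -, -, h, ht, -⟩ | h)
    · exact ht (List.append_eq_nil_iff.mp h.symm).1
    · exact segProd_nil p h
  | cons x xs' ih =>
    intro pre ps p hps
    have hps' := endProds_step pre ps x hps
    show p ∈ ps.map (· * x) ++ LB (x :: ps.map (· * x)) xs' ↔ _
    rw [List.mem_append, ih (pre ++ [x]) (x :: ps.map (· * x)) p hps']
    constructor
    · rintro (hmem | (⟨s', t', w', u', hsplit, hs'ne, rfl, ht', rfl⟩ | hseg))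
      · rw [List.mem_map] at hmem
        obtain ⟨q, hq, rfl⟩ := hmem
        obtain ⟨s, t, rfl, hs, rfl⟩ := (hps q).mp hq
        exact Or.inl ⟨s, [x], xs', t, rfl, hs, rfl, by simp, by simp⟩
      · obtain ⟨s, t'', rfl, hpre⟩ := (suffix_snoc pre x s').mp ⟨⟨u', hsplit⟩, hs'ne⟩
        rcases s.eq_nil_or_concat with rfl | ⟨s0, y, rfl⟩
        · -- segment x :: t' lies wholly inside x :: xs'
          refine Or.inr ⟨[], x :: t', w', by simp, ?_, by simp⟩
          cases t' with
          | nil => exact absurd rfl ht'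
          | cons a b => simp
        · rw [List.concat_eq_append] at hpre
          exact Or.inl ⟨s0 ++ [y], x :: t', w', t'', hpre, by simp, rfl, by simp,
            by simp [List.append_assoc]⟩
      · exact Or.inr ((segProd_cons x xs' p).mpr (Or.inr hseg))
    · rintro (⟨s, t, w, u, rfl, hs, hxt, ht, rfl⟩ | hseg)
      · match t, hxt, ht with
        | t0 :: t', hxt, _ =>
          obtain ⟨rfl, hxs⟩ : x = t0 ∧ xs' = t' ++ w := by simpa using hxt
          rcases t' with _ | ⟨t1, t''⟩
          · left
            rw [List.mem_map]
            exact ⟨s.prod, (hps s.prod).mpr ⟨s, u, rfl, hs, rfl⟩, by simp⟩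
          · right; left
            exact ⟨s ++ [x], t1 :: t'', w, u, by simp [List.append_assoc], by simp, hxs,
              by simp, by simp [List.append_assoc]⟩
      · rcases (segProd_cons x xs' p).mp hseg with ⟨t, v, rfl, ht, rfl⟩ | hseg'
        · right; left
          exact ⟨[x], t, v, pre, rfl, by simp, rfl, ht, by simp⟩
        · right; right; exact hseg'

lemma mem_LB_top (x : Int) (xs : List Int) (p : Int) :
    p ∈ LB [x] xs ↔ SegProd (x :: xs) p := by
  have hps : EndProds [x] [x] := by
    intro q
    simp only [List.mem_singleton]
    constructor
    · rintro hqx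
      exact ⟨[x], [], by simp, by simp, by simp [hqx]⟩
    · rintro ⟨s, t, hst, hs, rfl⟩
      obtain ⟨rfl, rfl⟩ : t = [] ∧ s = [x] := by
        rcases s with _ | ⟨a, s0⟩
        · exact absurd rfl hs
        · rcases t with _ | ⟨b, t0⟩
          · refine ⟨rfl, by simpa using hst.symm⟩
          · have := congrArg List.length hst
            simp at this
            try omega
      simp
  rw [mem_LB xs [x] [x] p hps, segProd_cons]
  constructor
  · rintro (⟨s, t, w, u, hsx, hs, rfl, ht, rfl⟩ | h)
    · obtain ⟨rfl, rfl⟩ : u = [] ∧ s = [x] := by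
        rcases s with _ | ⟨a, s0⟩
        · exact absurd rfl hs
        · rcases u with _ | ⟨b, u0⟩
          · refine ⟨rfl, by simpa using hsx.symm⟩
          · have := congrArg List.length hsx
            simp at this
            try omega
      exact Or.inl ⟨t, w, rfl, ht, by simp⟩
    · exact Or.inr h
  · rintro (⟨t, v, rfl, ht, rfl⟩ | h)
    · exact Or.inl ⟨[x], t, v, [], rfl, by simp, rfl, ht, by simp⟩
    · exact Or.inr h

-- ---- A side: reduce the pyRange/pyGetD loops to AG/prodScan ----

def AG : List Int → Int → Int
  | [], res => res
  | x :: t, res => AG t ((prodScan x t).foldl max res)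

lemma innerA_eq (t : List Int) : ∀ (res c : Int),
    (t.foldl stepA (res, c)).1 = (prodScan c t).foldl max res := by
  induction t with
  | nil => intro res c; simp [prodScan]
  | cons y ys ih => intro res c; simpa [prodScan, stepA] using ih (max res (c * y)) (c * y)

lemma bodyA_eq (nums : List Int) (k : Nat) (res : Int) (hk : k < nums.length) :
    bodyA nums res (k : Int) = (prodScan nums[k] (nums.drop (k + 1))).foldl max res := by
  unfold bodyA
  rw [PySem.List.foldl_pyRange_pyGetD' nums 0 stepA
    (res, PySem.List.pyGetD nums (k : Int) 0) (by positivity)]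
  have h1 : ((k : Int) + 1).toNat = k + 1 := by omega
  have h2 : PySem.List.pyGetD nums (k : Int) 0 = nums[k] := by
    rw [PySem.List.pyGetD_natCast, List.getD_eq_getElem _ _ hk]
  rw [h1, h2]
  exact innerA_eq _ res nums[k]

lemma outer_eq (nums : List Int) : ∀ (n k : Nat) (res : Int), nums.length - k = n → k ≤ nums.length →
    (PySem.List.pyRange (k : Int) (nums.length : Int) 1).foldl (bodyA nums) res = AG (nums.drop k) res := by
  intro n
  induction n with
  | zero =>
    intro k res h hk
    have hk' : k = nums.length := by omega
    rw [PySem.List.pyRange_one_eq_nil (by omega), hk', List.drop_length]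
    rfl
  | succ m ih =>
    intro k res h hk
    have hklt : k < nums.length := by omega
    rw [PySem.List.pyRange_one_cons (by exact_mod_cast hklt)]
    have h1 : ((k : Int) + 1) = ((k + 1 : Nat) : Int) := by push_cast; ring
    rw [List.foldl_cons, h1, ih (k + 1) _ (by omega) (by omega)]
    rw [bodyA_eq nums k res hklt]
    have hdrop : nums.drop k = nums[k] :: nums.drop (k + 1) := (List.drop_eq_getElem_cons hklt)
    rw [hdrop]
    rfl

lemma AG_eq (l : List Int) : ∀ res, AG l res = (LA l).foldl max res := by
  induction l with
  | nil => intro res; rfl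
  | cons x xs ih => intro res; simp [AG, LA, List.foldl_append, ih]

-- ---- B side: the loop invariant ----

lemma mul_le_max (p lo hi x : Int) (h1 : lo ≤ p) (h2 : p ≤ hi) :
    p * x ≤ max (hi * x) (lo * x) := by
  rcases le_total 0 x with hx | hx
  · exact le_max_of_le_left (mul_le_mul_of_nonneg_right h2 hx)
  · exact le_max_of_le_right (mul_le_mul_of_nonpos_right h1 hx)

lemma min_le_mul (p lo hi x : Int) (h1 : lo ≤ p) (h2 : p ≤ hi) :
    min (hi * x) (lo * x) ≤ p * x := by
  rcases le_total 0 x with hx | hx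
  · exact min_le_of_right_le (mul_le_mul_of_nonneg_right h1 hx)
  · exact min_le_of_left_le (mul_le_mul_of_nonpos_right h2 hx)

lemma foldl_max_map (ps : List Int) (hi lo x res : Int)
    (hhi : IsMaxOf hi ps) (hlo : IsMinOf lo ps) :
    (ps.map (· * x)).foldl max res = max (max res (hi * x)) (lo * x) := by
  apply le_antisymm
  · refine (foldl_max_le_iff _ _ _).mpr ⟨le_max_of_le_left (le_max_left _ _), ?_⟩
    rintro q hq
    rw [List.mem_map] at hq
    obtain ⟨p, hp, rfl⟩ := hq
    calc p * x ≤ max (hi * x) (lo * x) := mul_le_max p lo hi x (hlo.2 p hp) (hhi.2 p hp)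
    _ ≤ _ := by
        apply max_le
        · exact le_max_of_le_left (le_max_right _ _)
        · exact le_max_right _ _
  · apply max_le
    apply max_le
    · exact (le_foldl_max _ _).1
    · exact (le_foldl_max _ _).2 (hi * x) (List.mem_map_of_mem hhi.1)
    · exact (le_foldl_max _ _).2 (lo * x) (List.mem_map_of_mem hlo.1)

lemma isMaxOf_step (ps : List Int) (hi lo x : Int)
    (hhi : IsMaxOf hi ps) (hlo : IsMinOf lo ps) :
    IsMaxOf (max (max x (hi * x)) (lo * x)) (x :: ps.map (· * x)) := by
  constructor
  · rcases max_choice (max x (hi * x)) (lo * x) with h | h <;> rw [h]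
    · rcases max_choice x (hi * x) with h' | h' <;> rw [h']
      · exact List.mem_cons_self
      · exact List.mem_cons_of_mem _ (List.mem_map_of_mem hhi.1)
    · exact List.mem_cons_of_mem _ (List.mem_map_of_mem hlo.1)
  · intro q hq
    rcases List.mem_cons.mp hq with rfl | hq'
    · exact le_max_of_le_left (le_max_left _ _)
    · rw [List.mem_map] at hq'
      obtain ⟨p, hp, rfl⟩ := hq'
      calc p * x ≤ max (hi * x) (lo * x) := mul_le_max p lo hi x (hlo.2 p hp) (hhi.2 p hp)
      _ ≤ _ := max_le (le_max_of_le_left (le_max_right _ _)) (le_max_right _ _)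

lemma isMinOf_step (ps : List Int) (hi lo x : Int)
    (hhi : IsMaxOf hi ps) (hlo : IsMinOf lo ps) :
    IsMinOf (min (min x (hi * x)) (lo * x)) (x :: ps.map (· * x)) := by
  constructor
  · rcases min_choice (min x (hi * x)) (lo * x) with h | h <;> rw [h]
    · rcases min_choice x (hi * x) with h' | h' <;> rw [h']
      · exact List.mem_cons_self
      · exact List.mem_cons_of_mem _ (List.mem_map_of_mem hhi.1)
    · exact List.mem_cons_of_mem _ (List.mem_map_of_mem hlo.1)
  · intro q hq
    rcases List.mem_cons.mp hq with rfl | hq'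
    · exact min_le_of_left_le (min_le_left _ _)
    · rw [List.mem_map] at hq'
      obtain ⟨p, hp, rfl⟩ := hq'
      calc (min (min x (hi * x)) (lo * x)) ≤ min (hi * x) (lo * x) :=
        le_min (min_le_of_left_le (min_le_right _ _)) (min_le_right _ _)
      _ ≤ p * x := min_le_mul p lo hi x (hlo.2 p hp) (hhi.2 p hp)

lemma B_loop (xs : List Int) : ∀ (ps : List Int) (hi lo res : Int),
    IsMaxOf hi ps → IsMinOf lo ps →
    (xs.foldl stepB (hi, lo, res)).2.2 = (LB ps xs).foldl max res := by
  induction xs with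
  | nil => intro ps hi lo res _ _; rfl
  | cons x xs' ih =>
    intro ps hi lo res hhi hlo
    rw [List.foldl_cons]
    show (xs'.foldl stepB
      (max (max x (hi * x)) (lo * x), min (min x (hi * x)) (lo * x),
        max (max res (hi * x)) (lo * x))).2.2 = _
    rw [ih (x :: ps.map (· * x)) _ _ _ (isMaxOf_step ps hi lo x hhi hlo)
      (isMinOf_step ps hi lo x hhi hlo)]
    show _ = (ps.map (· * x) ++ LB (x :: ps.map (· * x)) xs').foldl max res
    rw [List.foldl_append, foldl_max_map ps hi lo x res hhi hlo]

-- ===== VERDICT (by name: the statement is the Claim_ definition above) =====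
theorem maxProdSubArrayBetter_spec : Claim_equal_maxProdSubArrayBetter := by
  intro nums _
  unfold Spec_maxProdSubArrayBetter
  have hA : maxProdSubArrayBetter nums = (LA nums).foldl max (-1) := by
    unfold maxProdSubArrayBetter
    have := outer_eq nums nums.length 0 (-1) (by omega) (by omega)
    simpa [AG_eq] using this
  rw [hA]
  match nums with
  | [] => rfl
  | x0 :: rest =>
    unfold maxProdSubArrayBetter_alt
    rw [PySem.List.slice_from_one]
    show _ = ((rest.foldl stepB (x0, x0, -1)).2.2)
    rw [B_loop rest [x0] x0 x0 (-1) ⟨List.mem_cons_self, by simp⟩ ⟨List.mem_cons_self, by simp⟩]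
    exact foldl_max_ext _ _ _ (fun p => (mem_LA _ p).trans (mem_LB_top x0 rest p).symm)
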